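-- pv_equiv track=rewrite | github.com/PrachponleuUch/Leetcode-HackerRank | Medium/x.py | numSmallerByFrequency
-- ===== SOURCE A (Python) =====
-- from typing import List
--
-- import bisect
--
-- def numSmallerByFrequency(queries: List[str], words: List[str]) -> List[int]:
--     def helper(word):
--         hash = {}
--         curr = word[0]
--         hash[curr] = 0
--         for s in word:
--             if s == curr:
--                 hash[s] += 1
--             elif s != curr:
--                 curr = s
--                 if s in hash:
--                     hash[s] += 1
--                 else:
--                     hash[s] = 1
--         return hash[min(hash.keys())]
--
--     qFreq = [helper(w) for w in queries]
--     wFreq = sorted([helper(w) for w in words])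
--     n = len(wFreq)
--     answer = []
--     for q in qFreq:
--         answer.append(n - bisect.bisect_right(wFreq, q))
--     return answer
-- ===== SOURCE B (Python) =====
-- def numSmallerByFrequency(queries, words):
--     def f(w):
--         return w.count(min(w))
--
--     wFreq = [f(w) for w in words]
--     m = max(wFreq, default=0)
--     counts = [0] * (m + 1)
--     for v in wFreq:
--         counts[v] += 1
--     greater = [0] * (m + 1)
--     running = 0
--     for v in range(m, -1, -1):
--         greater[v] = running
--         running += counts[v]
--     return [greater[f(q)] if f(q) <= m else 0 for q in queries]
-- ===== Notes on version B (the rewrite author's own statement) =====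
-- stated objective: faster
-- what changed: Replaces A's per-char dict-run helper by f(w)=w.count(min(w)) and replaces sort+per-query binary search by a frequency-bucket suffix table answering each query with one O(1) lookup; Pre_ excludes empty strings, on which both implementations raise (A: IndexError on word[0], B: ValueError on min(w)).
import Mathlib
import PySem

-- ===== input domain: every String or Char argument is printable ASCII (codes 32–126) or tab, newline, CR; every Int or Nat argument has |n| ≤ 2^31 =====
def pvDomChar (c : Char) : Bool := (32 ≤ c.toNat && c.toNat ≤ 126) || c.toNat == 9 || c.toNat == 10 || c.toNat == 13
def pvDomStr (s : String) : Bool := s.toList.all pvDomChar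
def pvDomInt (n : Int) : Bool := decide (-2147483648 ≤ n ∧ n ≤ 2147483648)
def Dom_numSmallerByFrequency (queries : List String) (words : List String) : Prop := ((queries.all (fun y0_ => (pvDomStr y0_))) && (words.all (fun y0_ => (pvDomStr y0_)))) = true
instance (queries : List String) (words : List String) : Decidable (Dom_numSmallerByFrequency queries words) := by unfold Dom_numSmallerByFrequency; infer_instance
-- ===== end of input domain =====

-- B replaces A's run-tracking dict helper by count-of-min-char and A's sort+bisect by a frequency-bucket suffix table with O(1) lookups.

-- ===== PORT A =====
-- one loop iteration of A's helper: state = (hash, curr)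
def helperStepA (st : PySem.Dict Char Int × Char) (s : Char) : PySem.Dict Char Int × Char :=
  if s == st.2 then (st.1.modify s 0 (· + 1), st.2)
  else if st.1.contains s then (st.1.modify s 0 (· + 1), s)
  else (st.1.insert s 1, s)

-- helper(word); word[0] raises IndexError on '' (excluded by Pre_), totalised with defaults, exact on nonempty words
def helperA (w : List Char) : Int :=
  let curr := PySem.List.pyGetD w 0 ' '
  let st := w.foldl helperStepA ((PySem.Dict.empty.insert curr 0), curr)
  st.1.getD (PySem.List.minD st.1.keys (fun k => k) curr) 0

def numSmallerByFrequency (queries : List String) (words : List String) : List Int :=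
  let qFreq := queries.map (fun w => helperA w.toList)
  let wFreq := PySem.List.sorted (words.map (fun w => helperA w.toList)) (fun x => x) false
  let n := (wFreq.length : Int)
  qFreq.foldl (fun answer q => answer ++ [n - (PySem.List.bisectRight wFreq q : Int)]) []

-- ===== PORT B =====
-- f(w) = w.count(min(w)); min(w) raises ValueError on '' (excluded by Pre_), totalised with a default
def helperB (w : List Char) : Int :=
  (w.count (PySem.List.minD w (fun c => c) ' ') : Int)

def numSmallerByFrequency_alt (queries : List String) (words : List String) : List Int :=
  let wFreq := words.map (fun w => helperB w.toList)
  let m := PySem.List.maxD wFreq (fun x => x) 0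
  let counts := wFreq.foldl (fun cs v => PySem.List.pySetD cs v (PySem.List.pyGetD cs v 0 + 1)) (List.replicate (m + 1).toNat 0)
  let gr := (PySem.List.pyRange m (-1) (-1)).foldl
      (fun (st : List Int × Int) v => (PySem.List.pySetD st.1 v st.2, st.2 + PySem.List.pyGetD counts v 0))
      (List.replicate (m + 1).toNat 0, 0)
  queries.map (fun q => if helperB q.toList ≤ m then PySem.List.pyGetD gr.1 (helperB q.toList) 0 else 0)

-- ===== PRECONDITION & SPEC =====
-- Pre_ excludes empty strings: there A raises IndexError (word[0]) and B raises ValueError (min(w)).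
def Pre_numSmallerByFrequency (queries : List String) (words : List String) : Prop :=
  (∀ q ∈ queries, q.toList ≠ []) ∧ (∀ w ∈ words, w.toList ≠ [])
instance (queries : List String) (words : List String) : Decidable (Pre_numSmallerByFrequency queries words) := by unfold Pre_numSmallerByFrequency; infer_instance

def pvWitness_numSmallerByFrequency : List String × List String := (["aabb", "z"], ["ab", "b", "ccc"])

def Spec_numSmallerByFrequency (queries : List String) (words : List String) (out : List Int) : Prop := out = numSmallerByFrequency_alt queries words
instance (queries : List String) (words : List String) (out : List Int) : Decidable (Spec_numSmallerByFrequency queries words out) := by unfold Spec_numSmallerByFrequency; infer_instance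

-- ===== CLAIM (what is proved, stated in full; the proofs are below) =====
def Claim_equal_numSmallerByFrequency : Prop := ∀ (queries : List String) (words : List String), Dom_numSmallerByFrequency queries words → Pre_numSmallerByFrequency queries words → Spec_numSmallerByFrequency queries words (numSmallerByFrequency queries words)

-- ===== LEMMAS AND PROOFS =====

theorem getD_of_not_contains {κ ν : Type} [BEq κ] (d : PySem.Dict κ ν) (k : κ) (v0 : ν)
    (h : d.contains k = false) : d.getD k v0 = v0 := by
  simp only [PySem.Dict.contains, List.any_eq_false] at h
  simp [PySem.Dict.getD, PySem.Dict.get?, List.find?_eq_none.2 h]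

-- the dict component of A's helper loop is the plain counting fold
theorem stepA_fst (w : List Char) : ∀ (d : PySem.Dict Char Int) (c : Char),
    (w.foldl helperStepA (d, c)).1 = w.foldl (fun d x => d.modify x 0 (· + 1)) d := by
  induction w with
  | nil => intro d c; rfl
  | cons s t ih =>
    intro d c
    simp only [List.foldl_cons, helperStepA]
    by_cases h1 : s == c
    · simp [h1, ih]
    · simp only [h1]
      by_cases h2 : d.contains s
      · simp [h2, ih]
      · have : d.insert s 1 = d.modify s 0 (· + 1) := by
          simp [PySem.Dict.modify, getD_of_not_contains d s 0 (by simpa using h2)]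
        simp [h2, ih, this]

theorem mem_set_update {α : Type} [BEq α] [LawfulBEq α] (l : List α) :
    ∀ (s : PySem.Set α) (x : α), x ∈ PySem.Set.update s l ↔ x ∈ s ∨ x ∈ l := by
  induction l with
  | nil => intro s x; simp [PySem.Set.update]
  | cons a t ih =>
    intro s x
    simp only [PySem.Set.update, List.foldl_cons] at *
    rw [ih (s.add a) x]
    simp [PySem.Set.mem_add]
    tauto

-- A's helper equals B's helper on nonempty words
theorem helperA_eq_helperB (w : List Char) (hw : w ≠ []) : helperA w = helperB w := by
  obtain ⟨h, t, rfl⟩ : ∃ h t, w = h :: t := by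
    cases w with
    | nil => exact absurd rfl hw
    | cons h t => exact ⟨h, t, rfl⟩
  have hcurr : PySem.List.pyGetD (h :: t) 0 ' ' = h := PySem.List.pyGetD_zero_cons h t ' '
  set d0 : PySem.Dict Char Int := PySem.Dict.empty.insert h 0 with hd0
  have hd0keys : d0.keys = [h] := by rfl
  have hd0getD : ∀ c : Char, d0.getD c 0 = 0 := by
    intro c
    rw [hd0, PySem.Dict.getD_insert]
    split <;> simp [PySem.Dict.getD, PySem.Dict.get?, PySem.Dict.empty]
  set d := (h :: t).foldl (fun d x => d.modify x 0 (· + 1)) d0 with hd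
  have hgetD : ∀ c : Char, d.getD c 0 = ((h :: t).count c : Int) := by
    intro c
    rw [hd, PySem.Dict.getD_foldl_modify_add_one, hd0getD]
    ring
  have hkeys : d.keys = PySem.Set.update ([h] : PySem.Set Char) (h :: t) := by
    rw [hd, PySem.Dict.keys_foldl_modify (h :: t) (0 : Int) (fun _ _ v => v + 1) d0, hd0keys]
  have hmemkeys : ∀ x : Char, x ∈ d.keys ↔ x ∈ (h :: t) := by
    intro x
    rw [hkeys, mem_set_update]
    constructor
    · rintro (hx | hx)
      · simp at hx; simp [hx]
      · exact hx
    · intro hx; exact Or.inr hx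
  -- the min key of the dict equals the min char of the word
  obtain ⟨m, hm⟩ : ∃ m, PySem.List.min? d.keys (fun k => k) = some m := by
    cases hmk : PySem.List.min? d.keys (fun k => k) with
    | some m => exact ⟨m, rfl⟩
    | none =>
      have : d.keys = [] := (PySem.List.min?_eq_none_iff d.keys (fun k => k)).mp hmk
      have : h ∈ d.keys := (hmemkeys h).mpr (by simp)
      simp_all
  obtain ⟨m', hm'⟩ : ∃ m', PySem.List.min? (h :: t) (fun c => c) = some m' := by
    cases hmk : PySem.List.min? (h :: t) (fun c => c) with
    | some m' => exact ⟨m', rfl⟩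
    | none =>
      have : (h :: t) = [] := (PySem.List.min?_eq_none_iff (h :: t) (fun c => c)).mp hmk
      simp at this
  have hmm : m = m' := by
    have h1 : m ∈ (h :: t) := (hmemkeys m).mp (PySem.List.min?_mem hm)
    have h2 : m' ∈ d.keys := (hmemkeys m').mpr (PySem.List.min?_mem hm')
    exact le_antisymm (PySem.List.min?_isMin hm m' h2) (PySem.List.min?_isMin hm' m h1)
  simp only [helperA, hcurr, ← hd0, stepA_fst (h :: t) d0 h, ← hd]
  simp only [PySem.List.minD, hm, Option.getD_some, hgetD]
  simp only [helperB, PySem.List.minD, hm', Option.getD_some, hmm]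

-- on a sorted list, n - bisect_right l q counts the elements strictly greater than q
theorem sub_bisectRight_eq_countP (l : List Int) (q : Int)
    (hs : l.Pairwise (fun a b => a ≤ b)) :
    (l.length : Int) - (PySem.List.bisectRight l q : Int) = (l.countP (fun v => q < v) : Int) := by
  obtain ⟨hle, hbefore, hafter⟩ := PySem.List.bisectRight_spec l q hs
  set r := PySem.List.bisectRight l q with hr
  have hsplit : l.countP (fun v => decide (q < v)) =
      (l.take r).countP (fun v => decide (q < v)) + (l.drop r).countP (fun v => decide (q < v)) := by
    conv_lhs => rw [← List.take_append_drop r l]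
    rw [List.countP_append]
  have htake : (l.take r).countP (fun v => decide (q < v)) = 0 := by
    rw [List.countP_eq_zero]
    intro a ha
    obtain ⟨i, hi, hia⟩ := List.getElem_of_mem ha
    have hlen : i < min r l.length := by simpa using hi
    have hi2 : i < r := lt_of_lt_of_le hlen (min_le_left _ _)
    have hil : i < l.length := lt_of_lt_of_le hlen (min_le_right _ _)
    rw [List.getElem_take] at hia
    have hle2 : l[i] ≤ q := hbefore i hil hi2
    rw [← hia]
    simp only [decide_eq_true_eq, not_lt]
    exact hle2
  have hdrop : (l.drop r).countP (fun v => decide (q < v)) = (l.drop r).length := by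
    rw [List.countP_eq_length]
    intro a ha
    obtain ⟨i, hi, hia⟩ := List.getElem_of_mem ha
    rw [List.getElem_drop] at hia
    have hlen : i < l.length - r := by simpa using hi
    have hri : r + i < l.length := by omega
    have hgt : q < l[r + i] := hafter (r + i) hri (Nat.le_add_right r i)
    rw [← hia]
    simpa using hgt
  have : l.countP (fun v => decide (q < v)) = l.length - r := by
    rw [hsplit, htake, hdrop, List.length_drop]; omega
  rw [this]
  omega

theorem pyGetD_replicate_zero (n : Nat) (u : Int) :
    PySem.List.pyGetD (List.replicate n (0 : Int)) u 0 = 0 := by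
  unfold PySem.List.pyGetD
  cases h : PySem.List.pyGet? (List.replicate n (0 : Int)) u with
  | none => rfl
  | some a =>
    have ha := PySem.List.mem_of_pyGet?_eq_some (List.replicate n 0) h
    simp [List.eq_of_mem_replicate ha]

-- the counting loop: counts[u] grows by the number of occurrences of u
theorem counts_inv (l : List Int) : ∀ (cs : List Int), (∀ v ∈ l, 0 ≤ v ∧ v < (cs.length : Int)) →
    (l.foldl (fun cs v => PySem.List.pySetD cs v (PySem.List.pyGetD cs v 0 + 1)) cs).length = cs.length ∧
    ∀ u : Int, 0 ≤ u →
      PySem.List.pyGetD (l.foldl (fun cs v => PySem.List.pySetD cs v (PySem.List.pyGetD cs v 0 + 1)) cs) u 0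
        = PySem.List.pyGetD cs u 0 + (l.count u : Int) := by
  induction l with
  | nil => intro cs _; simp
  | cons v t ih =>
    intro cs hb
    obtain ⟨hv0, hvlen⟩ := hb v (by simp)
    have hbt : ∀ x ∈ t, 0 ≤ x ∧ x < ((PySem.List.pySetD cs v (PySem.List.pyGetD cs v 0 + 1)).length : Int) := by
      intro x hx
      rw [PySem.List.length_pySetD]
      exact hb x (by simp [hx])
    obtain ⟨ihlen, ihget⟩ := ih (PySem.List.pySetD cs v (PySem.List.pyGetD cs v 0 + 1)) hbt
    constructor
    · simpa [PySem.List.length_pySetD] using ihlen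
    · intro u hu
      have hvlt : v.toNat < cs.length := by omega
      have hget : PySem.List.pyGetD (PySem.List.pySetD cs v (PySem.List.pyGetD cs v 0 + 1)) u 0
          = if u = v then PySem.List.pyGetD cs v 0 + 1 else PySem.List.pyGetD cs u 0 := by
        have hg := PySem.List.pyGetD_pySetD_natCast cs v.toNat u.toNat (PySem.List.pyGetD cs v 0 + 1) 0 hvlt
        rw [show ((v.toNat : Nat) : Int) = v by omega, show ((u.toNat : Nat) : Int) = u by omega] at hg
        rw [hg]
        by_cases h : u = v
        · rw [if_pos (by omega), if_pos h]
        · rw [if_neg (by omega), if_neg h]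
      rw [List.foldl_cons, ihget u hu, hget, List.count_cons]
      by_cases h : u = v
      · subst h
        rw [if_pos rfl, if_pos (by simp)]
        push_cast
        ring
      · rw [if_neg h, if_neg (by simpa using Ne.symm h)]
        push_cast
        ring

-- the countdown loop: greater[j] ends up as the sum of counts above j
theorem greater_inv (counts : List Int) : ∀ (k : Nat) (g : List Int) (run : Int), k ≤ g.length →
    ((PySem.List.pyRange ((k : Int) - 1) (-1) (-1)).foldl
        (fun (st : List Int × Int) v => (PySem.List.pySetD st.1 v st.2, st.2 + PySem.List.pyGetD counts v 0))
        (g, run)).1.length = g.length ∧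
    (∀ j : Nat, k ≤ j →
      PySem.List.pyGetD ((PySem.List.pyRange ((k : Int) - 1) (-1) (-1)).foldl
        (fun (st : List Int × Int) v => (PySem.List.pySetD st.1 v st.2, st.2 + PySem.List.pyGetD counts v 0))
        (g, run)).1 (j : Int) 0 = PySem.List.pyGetD g (j : Int) 0) ∧
    (∀ j : Nat, j < k →
      PySem.List.pyGetD ((PySem.List.pyRange ((k : Int) - 1) (-1) (-1)).foldl
        (fun (st : List Int × Int) v => (PySem.List.pySetD st.1 v st.2, st.2 + PySem.List.pyGetD counts v 0))
        (g, run)).1 (j : Int) 0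
        = run + ((PySem.List.pyRange ((j : Int) + 1) (k : Int)).map (fun u => PySem.List.pyGetD counts u 0)).sum) := by
  intro k
  induction k with
  | zero =>
    intro g run _
    rw [show ((0 : Nat) : Int) - 1 = -1 by ring, PySem.List.pyRange_neg_one_eq_nil (le_refl (-1))]
    refine ⟨rfl, fun j _ => rfl, fun j hj => absurd hj (by omega)⟩
  | succ k ih =>
    intro g run hk
    have hcons : PySem.List.pyRange (((k + 1 : Nat) : Int) - 1) (-1) (-1)
        = (k : Int) :: PySem.List.pyRange ((k : Int) - 1) (-1) (-1) := by
      have h1 : (((k + 1 : Nat) : Int) - 1) = (k : Int) := by push_cast; ring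
      rw [h1, PySem.List.pyRange_neg_one_cons (by omega)]
    rw [hcons, List.foldl_cons]
    have hklen : k < g.length := by omega
    obtain ⟨ihlen, ihup, ihlow⟩ := ih (PySem.List.pySetD g (k : Int) run) (run + PySem.List.pyGetD counts (k : Int) 0)
      (by rw [PySem.List.length_pySetD]; omega)
    refine ⟨by rw [ihlen, PySem.List.length_pySetD], ?_, ?_⟩
    · intro j hj
      rw [ihup j (by omega), PySem.List.pyGetD_pySetD_natCast g k j run 0 hklen]
      simp [show j ≠ k by omega]
    · intro j hj
      by_cases hjk : j < k
      · rw [ihlow j hjk]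
        have hsplit : PySem.List.pyRange ((j : Int) + 1) ((k : Int) + 1)
            = PySem.List.pyRange ((j : Int) + 1) (k : Int) ++ [(k : Int)] :=
          PySem.List.pyRange_one_succ_right (by omega)
        have hcast : (((k + 1 : Nat)) : Int) = (k : Int) + 1 := by push_cast; ring
        rw [hcast, hsplit, List.map_append, List.sum_append]
        simp
        ring
      · have hjek : j = k := by omega
        subst hjek
        rw [ihup j (le_refl j), PySem.List.pyGetD_pySetD_natCast g j j run 0 hklen]
        simp

theorem sum_ite_mem (x : Int) : ∀ (R : List Int), R.Nodup →
    (R.map (fun u => if u = x then (1 : Int) else 0)).sum = if x ∈ R then 1 else 0 := by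
  intro R
  induction R with
  | nil => intro _; simp
  | cons a t ih =>
    intro hnd
    rw [List.nodup_cons] at hnd
    rw [List.map_cons, List.sum_cons, ih hnd.2]
    by_cases hax : a = x
    · subst hax
      simp [hnd.1]
    · simp [hax, Ne.symm hax]

-- a strictly-greater count is the sum of per-value counts over (q, m]
theorem countP_eq_sum_count (q mx : Int) : ∀ (l : List Int), (∀ v ∈ l, v ≤ mx) →
    (l.countP (fun v => decide (q < v)) : Int)
      = ((PySem.List.pyRange (q + 1) (mx + 1)).map (fun u => (l.count u : Int))).sum := by
  intro l
  induction l with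
  | nil => intro _; simp
  | cons x t ih =>
    intro hub
    have hxle : x ≤ mx := hub x (by simp)
    have hsum : ((PySem.List.pyRange (q + 1) (mx + 1)).map (fun u => ((x :: t).count u : Int))).sum
        = ((PySem.List.pyRange (q + 1) (mx + 1)).map (fun u => (t.count u : Int))).sum
          + ((PySem.List.pyRange (q + 1) (mx + 1)).map (fun u => if u = x then (1 : Int) else 0)).sum := by
      rw [← PySem.List.sum_map_add_int]
      apply congrArg
      apply List.map_congr_left
      intro u _
      rw [List.count_cons]
      by_cases hux : u = x
      · simp [hux]
      · have : ¬ (x == u) = true := by simpa using Ne.symm hux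
        simp [hux, this]
    rw [hsum, sum_ite_mem x _ (PySem.List.nodup_pyRange_one _ _), ← ih (fun v hv => hub v (by simp [hv])),
      List.countP_cons]
    by_cases hqx : q < x
    · rw [if_pos (PySem.List.mem_pyRange_one.mpr ⟨by omega, by omega⟩)]
      simp [hqx]
    · rw [if_neg (fun h => absurd (PySem.List.mem_pyRange_one.mp h) (by omega))]
      simp [hqx]

-- the bucket table answers a query exactly like the strictly-greater count
theorem bucket_eq_countP (wf : List Int) (fq : Int) (h0 : ∀ v ∈ wf, 0 ≤ v) (hfq : 0 ≤ fq) :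
    (if fq ≤ PySem.List.maxD wf (fun x => x) 0 then
      PySem.List.pyGetD
        ((PySem.List.pyRange (PySem.List.maxD wf (fun x => x) 0) (-1) (-1)).foldl
          (fun (st : List Int × Int) v => (PySem.List.pySetD st.1 v st.2, st.2 +
            PySem.List.pyGetD (wf.foldl (fun cs v => PySem.List.pySetD cs v (PySem.List.pyGetD cs v 0 + 1))
              (List.replicate (PySem.List.maxD wf (fun x => x) 0 + 1).toNat 0)) v 0))
          (List.replicate (PySem.List.maxD wf (fun x => x) 0 + 1).toNat 0, 0)).1 fq 0
    else 0) = (wf.countP (fun v => decide (fq < v)) : Int) := by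
  set m := PySem.List.maxD wf (fun x => x) 0 with hm
  have hub : ∀ v ∈ wf, v ≤ m := by
    intro v hv
    have hne : wf ≠ [] := by intro h; subst h; simp at hv
    cases hmx : PySem.List.max? wf (fun x => x) with
    | none => exact absurd ((PySem.List.max?_eq_none_iff wf (fun x => x)).mp hmx) hne
    | some m0 =>
      have : m = m0 := by rw [hm]; simp [PySem.List.maxD, hmx]
      rw [this]
      exact PySem.List.max?_isMax hmx v hv
  have hm0 : 0 ≤ m := by
    cases hmx : PySem.List.max? wf (fun x => x) with
    | none => rw [hm]; simp [PySem.List.maxD, hmx]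
    | some m0 =>
      have hmem := PySem.List.max?_mem hmx
      have : m = m0 := by rw [hm]; simp [PySem.List.maxD, hmx]
      rw [this]
      exact h0 m0 hmem
  set cs0 : List Int := List.replicate (m + 1).toNat 0 with hcs0
  have hcs0len : (cs0.length : Int) = m + 1 := by rw [hcs0]; simp; omega
  set counts := wf.foldl (fun cs v => PySem.List.pySetD cs v (PySem.List.pyGetD cs v 0 + 1)) cs0 with hcounts
  obtain ⟨hclen, hcget⟩ := counts_inv wf cs0 (by
    intro v hv
    refine ⟨h0 v hv, ?_⟩
    rw [hcs0len]
    have := hub v hv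
    omega)
  obtain ⟨hglen, hgup, hglow⟩ := greater_inv counts (m + 1).toNat cs0 0 (by rw [hcs0]; simp)
  by_cases hcase : fq ≤ m
  · rw [if_pos hcase]
    have hstart : ((((m + 1).toNat : Nat) : Int) - 1) = m := by omega
    rw [hstart] at hglow
    have hj : fq = ((fq.toNat : Nat) : Int) := by omega
    have hjlt : fq.toNat < (m + 1).toNat := by omega
    rw [hj, hglow fq.toNat hjlt]
    have hcast2 : (((m + 1).toNat : Nat) : Int) = m + 1 := by omega
    rw [hcast2]
    have hmapeq : (PySem.List.pyRange ((fq.toNat : Int) + 1) (m + 1)).map (fun u => PySem.List.pyGetD counts u 0)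
        = (PySem.List.pyRange ((fq.toNat : Int) + 1) (m + 1)).map (fun u => (wf.count u : Int)) := by
      apply List.map_congr_left
      intro u hu
      rw [PySem.List.mem_pyRange_one] at hu
      rw [hcget u (by omega), hcs0, pyGetD_replicate_zero]
      ring
    rw [hmapeq, ← hj, countP_eq_sum_count fq m wf hub]
    ring
  · rw [if_neg hcase]
    have : wf.countP (fun v => decide (fq < v)) = 0 := by
      rw [List.countP_eq_zero]
      intro v hv
      have := hub v hv
      simp
      omega
    rw [this]
    simp

-- ===== VERDICT (by name: the statement is the Claim_ definition above) =====
theorem numSmallerByFrequency_spec : Claim_equal_numSmallerByFrequency := by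
  intro queries words _hdom hpre
  obtain ⟨hq, hw⟩ := hpre
  unfold Spec_numSmallerByFrequency numSmallerByFrequency numSmallerByFrequency_alt
  simp only [PySem.List.foldl_append_singleton_eq_map, List.nil_append, List.map_map]
  apply List.map_congr_left
  intro q hqmem
  simp only [Function.comp]
  have hmapeq : words.map (fun w => helperA w.toList) = words.map (fun w => helperB w.toList) :=
    List.map_congr_left (fun w hwmem => helperA_eq_helperB w.toList (hw w hwmem))
  set wf := words.map (fun w => helperB w.toList) with hwf
  have hsortperm : (PySem.List.sorted (words.map (fun w => helperA w.toList)) (fun x => x) false).Perm wf := by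
    rw [hmapeq]; exact PySem.List.sorted_perm wf (fun x => x) false
  have hpw : (PySem.List.sorted (words.map (fun w => helperA w.toList)) (fun x => x) false).Pairwise (fun a b => a ≤ b) := by
    have := PySem.List.sorted_pairwise (xs := words.map (fun w => helperA w.toList)) (key := fun x => x)
    simpa using this
  rw [helperA_eq_helperB q.toList (hq q hqmem)]
  rw [sub_bisectRight_eq_countP _ (helperB q.toList) hpw]
  rw [show (PySem.List.sorted (words.map (fun w => helperA w.toList)) (fun x => x) false).countP
        (fun v => decide (helperB q.toList < v)) = wf.countP (fun v => decide (helperB q.toList < v))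
      from hsortperm.countP_eq _]
  exact (bucket_eq_countP wf (helperB q.toList) (by
    intro v hv
    rw [hwf] at hv
    obtain ⟨w, _, rfl⟩ := List.mem_map.mp hv
    exact Int.natCast_nonneg _) (Int.natCast_nonneg _)).symm
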